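-- pv_equiv track=rewrite | github.com/lenivezzki/AortaAneurism | _modelling/feature_importance.py | feature_vote
-- ===== SOURCE A (Python) =====
-- def feature_vote(features_KBest, features_RFE, features_ET, features_L):
--     #Отбор фич по принципу: берем из каждого полученного 10 позиций, если совпадают голосованием, то берем
--     k = 10
--     f_1 = list(features_KBest)
--     f_1 = f_1[:k]
--     f_2 = list(features_RFE)
--     f_2 = f_2[:k]
--     f_3 = list(features_ET)
--     f_3 = f_3[:k]
--     f_4 = list(features_L)
--     all_features = f_1+f_2+f_3+f_4
--
--     to_vote_features = list(set(all_features))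
--     important_features_GL = []
--
--     for f in to_vote_features:
--         score = 0
--         if f in f_1: score += 1
--         else: score -= 1
--         if f in f_2: score += 1
--         else: score -= 1
--         if f in f_3: score += 1
--         else: score -= 1
--         if f in f_4: score += 1
--         else: score -= 1
--         if score >= 0: #не знаю, ставить равно или нет (поставила, улучшает прогноз)
--             important_features_GL.append(f)
--     return important_features_GL
-- ===== SOURCE B (Python) =====
-- def feature_vote(features_KBest, features_RFE, features_ET, features_L):
--     k = 10
--     f_1 = list(features_KBest)[:k]
--     f_2 = list(features_RFE)[:k]
--     f_3 = list(features_ET)[:k]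
--     f_4 = list(features_L)
--     counts = {}
--     for fl in (f_1, f_2, f_3, f_4):
--         for f in set(fl):
--             counts[f] = counts.get(f, 0) + 1
--     return [f for f in set(f_1 + f_2 + f_3 + f_4) if counts.get(f, 0) >= 2]
-- ===== Notes on version B (the rewrite author's own statement) =====
-- stated objective: faster
-- what changed: Replaces the four per-candidate list-membership scans with +/-1 voting by one hash count table built from the deduped lists, then a single threshold filter (count >= 2).
import Mathlib
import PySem

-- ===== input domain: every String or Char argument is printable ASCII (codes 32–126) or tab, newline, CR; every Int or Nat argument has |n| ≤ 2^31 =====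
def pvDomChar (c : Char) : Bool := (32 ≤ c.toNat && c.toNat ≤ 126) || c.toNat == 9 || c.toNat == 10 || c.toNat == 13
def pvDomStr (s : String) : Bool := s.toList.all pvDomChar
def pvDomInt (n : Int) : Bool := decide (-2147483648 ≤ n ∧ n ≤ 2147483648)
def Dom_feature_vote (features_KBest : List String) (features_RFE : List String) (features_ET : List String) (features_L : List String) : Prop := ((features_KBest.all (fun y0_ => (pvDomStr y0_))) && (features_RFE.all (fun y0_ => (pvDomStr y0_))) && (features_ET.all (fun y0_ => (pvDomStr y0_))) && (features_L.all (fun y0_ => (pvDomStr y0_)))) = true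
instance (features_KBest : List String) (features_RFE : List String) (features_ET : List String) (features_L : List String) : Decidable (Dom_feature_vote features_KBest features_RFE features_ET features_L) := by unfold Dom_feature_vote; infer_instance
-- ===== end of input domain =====

-- B replaces the four per-candidate membership scans with one count table over the deduped lists and a single count >= 2 threshold filter (measured faster in a timing run; output compared as a set, since Python iterates set(all_features) in hash order).

-- ===== PORT A =====
def feature_vote (features_KBest : List String) (features_RFE : List String) (features_ET : List String) (features_L : List String) : List String :=
  let k : Int := 10
  let f_1 := PySem.List.slice features_KBest none (some k)
  let f_2 := PySem.List.slice features_RFE none (some k)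
  let f_3 := PySem.List.slice features_ET none (some k)
  let f_4 := features_L
  let all_features := f_1 ++ f_2 ++ f_3 ++ f_4
  let to_vote_features := PySem.Set.ofList all_features
  to_vote_features.foldl (fun important_features_GL f =>
    let score : Int := 0
    let score := if f ∈ f_1 then score + 1 else score - 1
    let score := if f ∈ f_2 then score + 1 else score - 1
    let score := if f ∈ f_3 then score + 1 else score - 1
    let score := if f ∈ f_4 then score + 1 else score - 1
    if score ≥ 0 then important_features_GL ++ [f] else important_features_GL) []

-- ===== PORT B =====
def feature_vote_alt (features_KBest : List String) (features_RFE : List String) (features_ET : List String) (features_L : List String) : List String :=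
  let k : Int := 10
  let f_1 := PySem.List.slice features_KBest none (some k)
  let f_2 := PySem.List.slice features_RFE none (some k)
  let f_3 := PySem.List.slice features_ET none (some k)
  let f_4 := features_L
  -- 'for fl in (f_1,f_2,f_3,f_4): for f in set(fl): counts[f] = counts.get(f,0)+1'
  let counts := [f_1, f_2, f_3, f_4].foldl
    (fun d fl => (PySem.Set.ofList fl).foldl (fun d f => d.modify f 0 (· + 1)) d)
    (PySem.Dict.empty : PySem.Dict String Int)
  (PySem.Set.ofList (f_1 ++ f_2 ++ f_3 ++ f_4)).filter (fun f => counts.getD f 0 ≥ 2)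

-- ===== PRECONDITION & SPEC =====
def Spec_feature_vote (features_KBest : List String) (features_RFE : List String) (features_ET : List String) (features_L : List String) (out : List String) : Prop := out = feature_vote_alt features_KBest features_RFE features_ET features_L
instance (features_KBest : List String) (features_RFE : List String) (features_ET : List String) (features_L : List String) (out : List String) : Decidable (Spec_feature_vote features_KBest features_RFE features_ET features_L out) := by unfold Spec_feature_vote; infer_instance

-- ===== CLAIM (what is proved, stated in full; the proofs are below) =====
def Claim_equal_feature_vote : Prop := ∀ (features_KBest : List String) (features_RFE : List String) (features_ET : List String) (features_L : List String), Dom_feature_vote features_KBest features_RFE features_ET features_L → Spec_feature_vote features_KBest features_RFE features_ET features_L (feature_vote features_KBest features_RFE features_ET features_L)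

-- ===== LEMMAS AND PROOFS =====

theorem pv_count_ofList (xs : List String) (v : String) :
    (PySem.Set.ofList xs).count v = if v ∈ xs then 1 else 0 := by
  by_cases h : v ∈ xs
  · simp [h]
  · have hm : v ∉ PySem.Set.ofList xs := fun hv => h ((PySem.Set.mem_ofList _ _).1 hv)
    simp [h, List.count_eq_zero.2 hm]


-- ===== VERDICT (by name: the statement is the Claim_ definition above) =====
theorem feature_vote_spec : Claim_equal_feature_vote := by
  intro a b c d _
  show feature_vote a b c d = feature_vote_alt a b c d
  unfold feature_vote feature_vote_alt
  simp only [List.foldl, PySem.List.foldl_append_ite_eq_filter, List.nil_append]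
  apply List.filter_congr
  intro f _
  simp only [PySem.Dict.getD_foldl_modify_add_one, PySem.Dict.getD_empty, pv_count_ofList]
  by_cases h1 : f ∈ PySem.List.slice a none (some 10) <;>
    by_cases h2 : f ∈ PySem.List.slice b none (some 10) <;>
      by_cases h3 : f ∈ PySem.List.slice c none (some 10) <;>
        by_cases h4 : f ∈ d <;>
          simp [h1, h2, h3, h4]
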